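-- pv_equiv track=rewrite | github.com/Enurean/cs50p-hogwarts | hogwarts.py | validate_spell
-- ===== SOURCE A (Python) =====
-- def validate_spell(spell):
--     # Validate spell format and check in database
--     check_spell = spell.replace("-", "")
--     check_spell = check_spell.replace(" ", "")
--
--     for i in check_spell:
--         if not i.isalpha():
--             raise ValueError("Invalid name, numbers are not accepted")
--         else:
--             continue
--
--     # Return validated name
--     spell_joined_name = ''.join(i if i.isalpha() else '-' for i in spell)
--     spell_name = spell_joined_name.lower()
--     return spell_name
-- ===== SOURCE B (Python) =====
-- def validate_spell(spell):
--     # Single pass: validate and normalise each character at once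
--     result = []
--     for ch in spell:
--         if ch.isalpha():
--             result.append(ch.lower())
--         elif ch == " " or ch == "-":
--             result.append("-")
--         else:
--             raise ValueError("Invalid name, numbers are not accepted")
--     return "".join(result)
-- ===== Notes on version B (the rewrite author's own statement) =====
-- stated objective: simpler
-- what changed: A builds a stripped copy, scans it in a separate validation loop, then runs a second comprehension over the original string and lowercases the join; B is one pass over the string that validates and emits each normalised character simultaneously.
import Mathlib
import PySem

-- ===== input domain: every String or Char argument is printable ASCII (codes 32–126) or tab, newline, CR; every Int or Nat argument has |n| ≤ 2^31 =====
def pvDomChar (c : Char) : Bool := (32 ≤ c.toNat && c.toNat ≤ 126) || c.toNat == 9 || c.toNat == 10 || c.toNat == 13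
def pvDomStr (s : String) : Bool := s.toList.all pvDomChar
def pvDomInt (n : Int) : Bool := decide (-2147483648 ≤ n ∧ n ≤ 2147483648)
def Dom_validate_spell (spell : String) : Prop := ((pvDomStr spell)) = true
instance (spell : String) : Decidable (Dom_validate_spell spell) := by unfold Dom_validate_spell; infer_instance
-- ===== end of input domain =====

-- B fuses A's separate validation loop and transformation comprehension into one
-- character-by-character pass that validates and normalises simultaneously (objective: simpler).


-- ===== PORT A =====
-- literal port of A: strip '-' and ' ', scan the stripped copy (the scan only raises —
-- those inputs are outside Pre_, so inside Pre_ it is a no-op), then map the original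
-- string through the comprehension and lowercase the join.
def validate_spell (spell : String) : String :=
  let _check_spell := PySem.Str.replace (PySem.Str.replace spell "-" "") " " ""
  -- the validation loop over _check_spell raises ValueError on any non-alpha char;
  -- Pre_validate_spell excludes exactly those inputs, so here it computes nothing
  let spell_joined_name :=
    String.ofList (spell.toList.map (fun i => if PySem.Chars.isalpha i then i else '-'))
  PySem.Str.lower spell_joined_name

-- ===== PORT B =====
-- one pass: alpha → its lowercase, ' ' or '-' → '-', anything else raises ValueError
-- (excluded by Pre_; the port returns [] there, cutting the output short like the abort).
def validateSpellAltGo : List Char → List Char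
  | [] => []
  | c :: cs =>
    if PySem.Chars.isalpha c then PySem.Chars.lowerChar c :: validateSpellAltGo cs
    else if c = ' ' ∨ c = '-' then '-' :: validateSpellAltGo cs
    else []  -- Python raises ValueError here; unreachable under Pre_validate_spell

def validate_spell_alt (spell : String) : String :=
  String.ofList (validateSpellAltGo spell.toList)

-- ===== PRECONDITION & SPEC =====
-- exactly the inputs on which A returns normally: every character is alphabetic,
-- a space or a hyphen (otherwise A's validation loop raises ValueError)
def Pre_validate_spell (spell : String) : Prop :=
  spell.toList.all (fun c => PySem.Chars.isalpha c || c == ' ' || c == '-') = true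
instance (spell : String) : Decidable (Pre_validate_spell spell) := by
  unfold Pre_validate_spell; infer_instance

def pvWitness_validate_spell : String := "Wingardium Leviosa"

def Spec_validate_spell (spell : String) (out : String) : Prop := out = validate_spell_alt spell
instance (spell : String) (out : String) : Decidable (Spec_validate_spell spell out) := by
  unfold Spec_validate_spell; infer_instance

-- ===== CLAIM (what is proved, stated in full; the proofs are below) =====
def Claim_equal_validate_spell : Prop :=
  ∀ (spell : String), Dom_validate_spell spell → Pre_validate_spell spell →
    Spec_validate_spell spell (validate_spell spell)

-- ===== LEMMAS AND PROOFS =====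
theorem validate_spell_go (l : List Char)
    (h : l.all (fun c => PySem.Chars.isalpha c || c == ' ' || c == '-') = true) :
    (l.map (fun i => if PySem.Chars.isalpha i then i else '-')).map PySem.Chars.lowerChar
      = validateSpellAltGo l := by
  induction l with
  | nil => rfl
  | cons c cs ih =>
    simp only [List.all_cons, Bool.and_eq_true, Bool.or_eq_true, beq_iff_eq] at h
    simp only [List.map_cons, validateSpellAltGo]
    by_cases ha : PySem.Chars.isalpha c
    · simp [ha, ih h.2]
    · have hc : c = ' ' ∨ c = '-' := by
        rcases h.1 with (h1 | h1) | h1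
        · exact absurd h1 ha
        · exact Or.inl h1
        · exact Or.inr h1
      have : PySem.Chars.lowerChar '-' = '-' := by decide
      simp [ha, hc, this, ih h.2]

-- ===== VERDICT (by name: the statement is the Claim_ definition above) =====
theorem validate_spell_spec : Claim_equal_validate_spell := by
  intro spell _ hpre
  unfold Spec_validate_spell validate_spell validate_spell_alt
  have := validate_spell_go spell.toList hpre
  apply String.toList_injective
  simpa [PySem.Str.lower, PySem.Chars.lower, String.toList_ofList, List.map_map] using this
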